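-- pv_equiv track=rewrite | github.com/pypi-data/pypi-mirror-112 | packages/mincube/mincube-0.2.0.tar.gz/mincube-0.2.0/mincube/getCubes.py | minCubes
-- ===== SOURCE A (Python) =====
-- def minCubes( boxVolume:int, noCubes:list ):
--     '''
--     This function will return the minimum number of cubes that can fill the box
--     params:
--         boxVolume: Volume of the bigger box
--         noCubes: The number of cubes that we can use to fill the box
--     return:
--         -1, if we cant fill box
--         minCubeCount, in all other scenarios
--     '''
--     if boxVolume == 0: #if volume of the box is 0, we can't fill the box, thus return -1
--         return -1
--
--     minCubeCount = 0
--     for idx in range(len(noCubes)-1, -1, -1): #start filling with the larger cube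
--         sideSize = pow(2,idx)#get the size of the side based on the index
--         cubeVolume = pow(sideSize,3)#calculate volume of cube
--
--         while(boxVolume >= 0  and noCubes[idx] > 0 and noCubes[idx] != 0 and cubeVolume <= boxVolume):
--             boxVolume = boxVolume - cubeVolume
--             noCubes[idx] = noCubes[idx] - 1
--             minCubeCount = minCubeCount + 1
--
--     if boxVolume > 0: #even after filling all the cubes in the box, if the volume left is not 0, return -1
--         return -1
--
--     return minCubeCount
-- ===== SOURCE B (Python) =====
-- def minCubes(boxVolume, noCubes):
--     # Note: A mutates noCubes in place (decrements used counts); B does not.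
--     # Equivalence claimed is about the return value only.
--     if boxVolume == 0:
--         return -1
--     count = 0
--     rem = boxVolume
--     for idx in range(len(noCubes) - 1, -1, -1):
--         vol = 1 << (3 * idx)
--         take = min(noCubes[idx], rem // vol)
--         if take > 0:
--             rem -= take * vol
--             count += take
--     return -1 if rem > 0 else count
-- ===== Notes on version B (the rewrite author's own statement) =====
-- stated objective: faster
-- what changed: A removes cubes one at a time in an inner while loop (O(number of cubes placed) iterations); B computes the number of cubes taken at each index in one step with integer division, doing O(len(noCubes)) work total.
import Mathlib
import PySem

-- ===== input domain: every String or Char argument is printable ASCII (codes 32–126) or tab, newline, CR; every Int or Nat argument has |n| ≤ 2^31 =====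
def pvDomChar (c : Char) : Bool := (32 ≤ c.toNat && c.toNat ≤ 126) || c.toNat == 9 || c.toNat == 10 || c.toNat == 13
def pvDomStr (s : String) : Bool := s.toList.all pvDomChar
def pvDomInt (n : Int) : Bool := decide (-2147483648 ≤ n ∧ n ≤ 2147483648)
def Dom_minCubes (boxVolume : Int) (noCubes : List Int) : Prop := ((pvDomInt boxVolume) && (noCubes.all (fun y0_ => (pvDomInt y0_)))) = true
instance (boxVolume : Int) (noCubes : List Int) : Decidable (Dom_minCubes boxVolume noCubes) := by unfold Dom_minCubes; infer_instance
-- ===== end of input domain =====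

-- B replaces A's one-cube-at-a-time inner while loop by a single integer division per
-- index (return value only: A mutates noCubes in place, B does not).

-- ===== PORT A =====
-- inner while loop of A: state (boxVolume, minCubeCount); c = noCubes[idx], cube = cubeVolume
def minCubesWhile (b cnt c : Int) (cube : Nat) : Int × Int :=
  if h : 0 ≤ b ∧ 0 < c ∧ (cube : Int) ≤ b then
    minCubesWhile (b - cube) (cnt + 1) (c - 1) cube
  else (b, cnt)
termination_by b.toNat + c.toNat
decreasing_by omega

def minCubes (boxVolume : Int) (noCubes : List Int) : Int :=
  if boxVolume = 0 then -1
  else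
    let s := (PySem.List.pyRange ((noCubes.length : Int) - 1) (-1) (-1)).foldl
      (fun (s : Int × Int) idx =>
        let sideSize : Nat := 2 ^ idx.toNat
        let cubeVolume : Nat := sideSize ^ 3
        minCubesWhile s.1 s.2 (PySem.List.pyGetD noCubes idx 0) cubeVolume)
      (boxVolume, 0)
    if s.1 > 0 then -1 else s.2

-- ===== PORT B =====
def minCubes_alt (boxVolume : Int) (noCubes : List Int) : Int :=
  if boxVolume = 0 then -1
  else
    let s := (PySem.List.pyRange ((noCubes.length : Int) - 1) (-1) (-1)).foldl
      (fun (s : Int × Int) idx =>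
        let vol : Int := 2 ^ (3 * idx.toNat)
        let take := min (PySem.List.pyGetD noCubes idx 0) (PySem.Int.floordiv s.1 vol)
        if take > 0 then (s.1 - take * vol, s.2 + take) else s)
      (boxVolume, 0)
    if s.1 > 0 then -1 else s.2

-- ===== PRECONDITION & SPEC =====
def Spec_minCubes (boxVolume : Int) (noCubes : List Int) (out : Int) : Prop := out = minCubes_alt boxVolume noCubes
instance (boxVolume : Int) (noCubes : List Int) (out : Int) : Decidable (Spec_minCubes boxVolume noCubes out) := by unfold Spec_minCubes; infer_instance

-- ===== CLAIM (what is proved, stated in full; the proofs are below) =====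
def Claim_equal_minCubes : Prop := ∀ (boxVolume : Int) (noCubes : List Int), Dom_minCubes boxVolume noCubes → Spec_minCubes boxVolume noCubes (minCubes boxVolume noCubes)

-- ===== LEMMAS AND PROOFS =====

-- closed form of A's while loop: it removes take = max 0 (min c (b // cube)) cubes at once
theorem minCubesWhile_eq (b cnt c : Int) (cube : Nat) (hc : 1 ≤ cube) :
    minCubesWhile b cnt c cube =
      (b - max 0 (min c (PySem.Int.floordiv b (cube : Int))) * (cube : Int),
       cnt + max 0 (min c (PySem.Int.floordiv b (cube : Int)))) := by
  have hpos : (0 : Int) < (cube : Int) := by exact_mod_cast hc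
  fun_induction minCubesWhile b cnt c cube with
  | case1 b cnt c h ih =>
    obtain ⟨hb, hcpos, hble⟩ := h
    have hqb := (PySem.Int.floordiv_eq_iff_of_pos hpos).mp
      (rfl : PySem.Int.floordiv b (cube : Int) = PySem.Int.floordiv b (cube : Int))
    have hq1 : 1 ≤ PySem.Int.floordiv b (cube : Int) :=
      (PySem.Int.le_floordiv_iff_mul_le hpos).mpr (by linarith)
    have hq' : PySem.Int.floordiv (b - (cube : Int)) (cube : Int)
        = PySem.Int.floordiv b (cube : Int) - 1 := by
      rw [PySem.Int.floordiv_eq_iff_of_pos hpos]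
      constructor <;> nlinarith [hqb.1, hqb.2]
    rw [ih, hq']
    set q := PySem.Int.floordiv b (cube : Int) with hqdef
    have ht : max 0 (min (c - 1) (q - 1)) = max 0 (min c q) - 1 := by omega
    rw [ht]
    rw [Prod.mk.injEq]
    exact ⟨by ring, by ring⟩
  | case2 b cnt c h =>
    set q := PySem.Int.floordiv b (cube : Int) with hqdef
    have hz : max 0 (min c q) = 0 := by
      by_cases hcpos : 0 < c
      · have hb : b < (cube : Int) := by omega
        have : q < 1 := (PySem.Int.floordiv_lt_iff_lt_mul hpos).mpr (by linarith)
        omega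
      · omega
    rw [hz]
    rw [Prod.mk.injEq]
    exact ⟨by ring, by ring⟩

-- the two per-index step functions agree (zeta-reduced forms of the lambdas in the ports)
theorem minCubes_step_eq (noCubes : List Int) :
    (fun (s : Int × Int) (idx : Int) =>
      minCubesWhile s.1 s.2 (PySem.List.pyGetD noCubes idx 0) ((2 ^ idx.toNat) ^ 3))
    = (fun (s : Int × Int) (idx : Int) =>
      if min (PySem.List.pyGetD noCubes idx 0) (PySem.Int.floordiv s.1 ((2 : Int) ^ (3 * idx.toNat))) > 0 then
        (s.1 - min (PySem.List.pyGetD noCubes idx 0) (PySem.Int.floordiv s.1 ((2 : Int) ^ (3 * idx.toNat)))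
                * (2 : Int) ^ (3 * idx.toNat),
         s.2 + min (PySem.List.pyGetD noCubes idx 0) (PySem.Int.floordiv s.1 ((2 : Int) ^ (3 * idx.toNat))))
      else s) := by
  funext s idx
  have hc : 1 ≤ (2 ^ idx.toNat) ^ 3 := Nat.one_le_pow _ _ (Nat.one_le_pow _ _ (by norm_num))
  have hcast : (((2 ^ idx.toNat) ^ 3 : Nat) : Int) = (2 : Int) ^ (3 * idx.toNat) := by
    push_cast
    rw [← pow_mul, Nat.mul_comm]
  rw [minCubesWhile_eq s.1 s.2 _ _ hc, hcast]
  set c := PySem.List.pyGetD noCubes idx 0 with hcdef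
  set q := PySem.Int.floordiv s.1 ((2 : Int) ^ (3 * idx.toNat)) with hqdef
  by_cases ht : 0 < min c q
  · rw [if_pos ht]
    have : max 0 (min c q) = min c q := by omega
    rw [this]
  · rw [if_neg ht]
    have : max 0 (min c q) = 0 := by omega
    rw [this]
    simp

-- ===== VERDICT (by name: the statement is the Claim_ definition above) =====
theorem minCubes_spec : Claim_equal_minCubes := by
  intro boxVolume noCubes _
  unfold Spec_minCubes minCubes minCubes_alt
  by_cases hb : boxVolume = 0
  · simp [hb]
  · simp only [if_neg hb]
    rw [minCubes_step_eq]
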